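-- pv_equiv track=rewrite | github.com/elenasy/InfoB | Zettel6/Aufgabe31_Yanez_Wentzel.py | wechseln
-- ===== SOURCE A (Python) =====
-- def wechseln(munze, betrag):
--     moeglichemuenzen=[]
--     wechselgeld=[]
--
--     # Abfangen ungültiger Betrageingaben
--     if type(betrag) != int:
--         raise TypeError("Der Betrag muss eine ganze Zahl sein!")
--
--     # Abfangen ungültiger Übergaben der Münzwerte
--     if type(munze) != list:
--         raise TypeError("Es muss eine Liste mit ganzzahligen Münzwerten übergeben werden!")
--
--     for element in munze:
--         if type(element) != int:
--             raise TypeError("Die Liste der Münzwerte darf nur ganze Zahlen enthalten!")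
--
--     while betrag>0:
--         for x in munze:
--             if x <= betrag:
--                 moeglichemuenzen.append(x)
--
--         wechselgeld.append(max(moeglichemuenzen))
--         betrag-=max(moeglichemuenzen)
--         del moeglichemuenzen[:]
--
--     return wechselgeld
-- ===== SOURCE B (Python) =====
-- def wechseln(munze, betrag):
--     wechselgeld = []
--     for c in sorted(set(munze), reverse=True):
--         if betrag <= 0:
--             break
--         if 0 < c <= betrag:
--             k = betrag // c
--             wechselgeld.extend([c] * k)
--             betrag -= k * c
--     return wechselgeld
-- ===== Notes on version B (the rewrite author's own statement) =====
-- stated objective: alternative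
-- what changed: Replaces A's while loop that rescans the whole coin list and hands out one coin per iteration by a single descending pass over sorted(set(munze)) that emits each coin's full count via floor division.
-- outside the precondition, e.g. on wechseln([-1, 4, 191, 169], 1): A returns [-1, -1, -1, 4], B returns []; on wechseln([2, 3], 7): A raises ValueError, B returns [3, 3]
import Mathlib
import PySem

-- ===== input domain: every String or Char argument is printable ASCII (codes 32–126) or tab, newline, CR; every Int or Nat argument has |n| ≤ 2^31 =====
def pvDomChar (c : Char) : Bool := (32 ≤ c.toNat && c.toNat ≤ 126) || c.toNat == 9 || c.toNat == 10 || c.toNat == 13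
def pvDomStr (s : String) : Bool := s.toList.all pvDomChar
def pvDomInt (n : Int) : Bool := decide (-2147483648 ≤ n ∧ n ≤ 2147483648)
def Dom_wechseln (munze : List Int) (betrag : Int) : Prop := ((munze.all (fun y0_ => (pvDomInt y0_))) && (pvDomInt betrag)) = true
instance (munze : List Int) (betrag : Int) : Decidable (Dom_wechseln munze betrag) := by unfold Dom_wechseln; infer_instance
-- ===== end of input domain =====

-- B replaces A's one-coin-per-iteration while loop (rescanning all coins each step) by one
-- descending pass over the distinct coins with floor division batching each coin's count.

-- ===== PORT A =====
-- A's while loop, one iteration per coin handed out; fuel = betrag.toNat bounds the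
-- iterations (each one subtracts at least 1 under Pre_). On max([]) Python raises
-- ValueError (the 'none' branch); those inputs are outside Pre_.
def wechselnLoopA (munze : List Int) : Nat → Int → List Int
  | 0, _ => []
  | fuel+1, betrag =>
    if betrag > 0 then
      -- moeglichemuenzen = [x for x in munze if x <= betrag]
      let moegliche := munze.filter (fun x => decide (x ≤ betrag))
      match PySem.List.max? moegliche (fun y => y) with
      | none => []  -- Python: ValueError, excluded by Pre_
      | some m => m :: wechselnLoopA munze fuel (betrag - m)
    else []

def wechseln (munze : List Int) (betrag : Int) : List Int :=
  wechselnLoopA munze betrag.toNat betrag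

-- ===== PORT B =====
-- for c in sorted(set(munze), reverse=True): batch k = betrag // c copies of c
def wechselnLoopB : List Int → Int → List Int
  | [], _ => []
  | c :: rest, betrag =>
    if betrag ≤ 0 then []
    else if 0 < c ∧ c ≤ betrag then
      let k := PySem.Int.floordiv betrag c
      List.replicate k.toNat c ++ wechselnLoopB rest (betrag - k * c)
    else wechselnLoopB rest betrag

def wechseln_alt (munze : List Int) (betrag : Int) : List Int :=
  wechselnLoopB (PySem.List.sorted (PySem.Set.ofList munze) (fun x => x) true) betrag

-- ===== PRECONDITION & SPEC =====
-- cascadeRem: the remainder the greedy process leaves — fold the sorted distinct coins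
-- (largest first) over the amount, reducing it mod each coin that fits.
def cascadeRem : List Int → Int → Int
  | [], r => r
  | c :: t, r => if c ≤ r then cascadeRem t (r % c) else cascadeRem t r

-- Pre_ asks the positive coins alone to clear the amount (cascade remainder 0): exactly
-- then A never touches a nonpositive coin. It excludes the inputs where A raises
-- ValueError or never terminates (greedy gets stuck on the positive coins with no
-- nonpositive coin to fall back on), and the inputs outside the natural domain of
-- change-making where A falls back on nonpositive coin values and returns lists
-- containing negative "coins" (see the excluded example below).
def Pre_wechseln (munze : List Int) (betrag : Int) : Prop :=
  betrag ≤ 0 ∨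
    cascadeRem ((PySem.List.sorted (PySem.Set.ofList munze) (fun x => x) true).filter
      (fun c => decide (0 < c))) betrag = 0
instance (munze : List Int) (betrag : Int) : Decidable (Pre_wechseln munze betrag) := by
  unfold Pre_wechseln; infer_instance

def pvWitness_wechseln : List Int × Int := ([25, 10, 5, 1], 63)

def Spec_wechseln (munze : List Int) (betrag : Int) (out : List Int) : Prop := out = wechseln_alt munze betrag
instance (munze : List Int) (betrag : Int) (out : List Int) : Decidable (Spec_wechseln munze betrag out) := by unfold Spec_wechseln; infer_instance

-- ===== CLAIM (what is proved, stated in full; the proofs are below) =====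
def Claim_equal_wechseln : Prop := ∀ (munze : List Int) (betrag : Int), Dom_wechseln munze betrag → Pre_wechseln munze betrag → Spec_wechseln munze betrag (wechseln munze betrag)

-- ===== LEMMAS AND PROOFS =====

theorem loopB_nonpos (l : List Int) (b : Int) (hb : b ≤ 0) : wechselnLoopB l b = [] := by
  cases l with
  | nil => rfl
  | cons c rest => simp [wechselnLoopB, hb]

theorem loopB_skip (c : Int) (rest : List Int) (b : Int) (hc : b < c) :
    wechselnLoopB (c :: rest) b = wechselnLoopB rest b := by
  by_cases hb : b ≤ 0
  · rw [loopB_nonpos _ _ hb, loopB_nonpos _ _ hb]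
  · have : ¬ (0 < c ∧ c ≤ b) := by omega
    simp [wechselnLoopB, hb, this]

-- the crux: when m is the greatest coin ≤ b, B's batched pass peels exactly one m off the front
theorem loopB_step (S : List Int) (b m : Int)
    (hpair : S.Pairwise (fun a b => b < a))
    (hmS : m ∈ S) (hmb : m ≤ b) (hm1 : 1 ≤ m) (hb : 0 < b)
    (hmax : ∀ x ∈ S, x ≤ b → x ≤ m) :
    wechselnLoopB S b = m :: wechselnLoopB S (b - m) := by
  induction S with
  | nil => cases hmS
  | cons c rest ih =>
    rcases List.pairwise_cons.mp hpair with ⟨hgt, hpr⟩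
    by_cases hcb : c ≤ b
    · -- m = c
      have hcm : c ≤ m := hmax c (List.mem_cons_self) hcb
      have hmc : m = c := by
        rcases List.mem_cons.mp hmS with h | h
        · exact h
        · exact absurd (hgt m h) (by omega)
      subst hmc
      have hc0 : 0 < m := by omega
      have hk : PySem.Int.floordiv b m = b / m := PySem.Int.floordiv_eq_ediv_of_pos hc0
      have hk1 : 1 ≤ b / m := by
        rw [Int.le_ediv_iff_mul_le hc0]; omega
      by_cases hbm : b - m ≤ 0
      · -- b = m, single coin
        have hbme : b = m := by omega
        have hkeq : b / m = 1 := by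
          have hlt : b / m < 2 := by
            rw [Int.ediv_lt_iff_lt_mul hc0]; omega
          omega
        have hng : ¬ b ≤ 0 := by omega
        simp [wechselnLoopB, hng, hc0, hcb, hkeq, loopB_nonpos _ _ hbm]
        omega
      · replace hbm : 0 < b - m := by omega
        have hng : ¬ b ≤ 0 := by omega
        have hng' : ¬ b - m ≤ 0 := by omega
        by_cases h2 : m ≤ b - m
        · -- k ≥ 2 : peel one copy off the replicate block
          have hk' : PySem.Int.floordiv (b - m) m = b / m - 1 := by
            rw [PySem.Int.floordiv_eq_ediv_of_pos hc0]
            have : b - m = b + (-1) * m := by ring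
            rw [this, Int.add_mul_ediv_right _ _ (by omega : m ≠ 0)]
            ring
          have hk2 : 2 ≤ b / m := by
            rw [Int.le_ediv_iff_mul_le hc0]; omega
          simp only [wechselnLoopB, hng, hng', hc0, hcb, h2, and_self, if_true, if_false,
            hk, hk']
          have hrep : List.replicate (b / m).toNat m =
              m :: List.replicate (b / m - 1).toNat m := by
            have : (b / m).toNat = (b / m - 1).toNat + 1 := by omega
            rw [this, List.replicate_succ]
          rw [hrep]
          have harg : b - m - (b / m - 1) * m = b - b / m * m := by ring
          simp [harg]
        · -- k = 1 : exactly one copy, then c is skipped on the remainder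
          have hkeq : b / m = 1 := by
            have hlt : b / m < 2 := by
              rw [Int.ediv_lt_iff_lt_mul hc0]; omega
            omega
          have hng2 : ¬ (0 < m ∧ m ≤ b - m) := by omega
          simp [wechselnLoopB, hng, hng', hc0, hcb, hkeq, h2]
    · -- c > b : both sides skip c
      replace hcb : b < c := by omega
      have hmrest : m ∈ rest := by
        rcases List.mem_cons.mp hmS with h | h
        · omega
        · exact h
      rw [loopB_skip c rest b hcb, loopB_skip c rest (b - m) (by omega)]
      exact ih hpr hmrest (fun x hx hxb => hmax x (List.mem_cons_of_mem _ hx) hxb)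

-- if no coin fits, the cascade leaves the amount unchanged
theorem cascadeRem_no_fit (S : List Int) (r : Int) (h : ∀ c ∈ S, r < c) :
    cascadeRem S r = r := by
  induction S with
  | nil => rfl
  | cons c rest ih =>
    have hc : r < c := h c List.mem_cons_self
    have : ¬ c ≤ r := by omega
    simp only [cascadeRem, this, if_false]
    exact ih (fun x hx => h x (List.mem_cons_of_mem _ hx))

-- handing out one greatest fitting coin preserves the cascade remainder
theorem cascadeRem_step (S : List Int) (r m : Int)
    (hpair : S.Pairwise (fun a b => b < a))
    (hmS : m ∈ S) (hmr : m ≤ r) (hm0 : 0 < m)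
    (hmax : ∀ x ∈ S, x ≤ r → x ≤ m) :
    cascadeRem S r = cascadeRem S (r - m) := by
  induction S with
  | nil => cases hmS
  | cons c rest ih =>
    rcases List.pairwise_cons.mp hpair with ⟨hgt, hpr⟩
    by_cases hcr : c ≤ r
    · -- m = c
      have hcm : c ≤ m := hmax c List.mem_cons_self hcr
      have hmc : m = c := by
        rcases List.mem_cons.mp hmS with h | h
        · exact h
        · exact absurd (hgt m h) (by omega)
      subst hmc
      by_cases h2 : m ≤ r - m
      · have : (r - m) % m = r % m := Int.sub_emod_right r m
        simp [cascadeRem, hcr, h2, this]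
      · have hlt : r - m < m := by omega
        have : ¬ m ≤ r - m := by omega
        have hrm : r % m = r - m := by
          have := Int.sub_emod_right r m
          rw [← this]
          exact Int.emod_eq_of_lt (by omega) hlt
        simp [cascadeRem, hcr, this, hrm]
    · -- c > r : both sides skip c
      have hc1 : ¬ c ≤ r := hcr
      have hc2 : ¬ c ≤ r - m := by omega
      have hmrest : m ∈ rest := by
        rcases List.mem_cons.mp hmS with h | h
        · omega
        · exact h
      simp only [cascadeRem, hc1, hc2, if_false]
      exact ih hpr hmrest (fun x hx hxb => hmax x (List.mem_cons_of_mem _ hx) hxb)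

theorem loopA_eq_loopB (munze : List Int) :
    ∀ (fuel : Nat) (b : Int), b.toNat ≤ fuel →
      cascadeRem ((PySem.List.sorted (PySem.Set.ofList munze) (fun x => x) true).filter
        (fun c => decide (0 < c))) b = 0 →
      wechselnLoopA munze fuel b =
        wechselnLoopB (PySem.List.sorted (PySem.Set.ofList munze) (fun x => x) true) b := by
  intro fuel
  induction fuel with
  | zero =>
    intro b hb _
    have : b ≤ 0 := by omega
    rw [loopB_nonpos _ _ this]; rfl
  | succ fuel ih =>
    intro b hb hcas
    -- the sorted distinct coin list
    set S := PySem.List.sorted (PySem.Set.ofList munze) (fun x => x) true with hS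
    have hperm : S.Perm (PySem.Set.ofList munze) := PySem.List.sorted_perm _ _ _
    have hmemS : ∀ x : Int, x ∈ S ↔ x ∈ munze := by
      intro x
      rw [hperm.mem_iff, PySem.Set.mem_ofList]
    set Spos := S.filter (fun c => decide (0 < c)) with hSpos
    by_cases hpos' : b > 0
    · -- some positive coin fits, else cascadeRem Spos b = b ≠ 0
      have hfit : ∃ c ∈ Spos, c ≤ b := by
        by_contra hno
        push Not at hno
        have := cascadeRem_no_fit Spos b hno
        omega
      obtain ⟨c0, hc0S, hc0b⟩ := hfit
      have hc00 : (0 : Int) < c0 := by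
        have := (List.mem_filter.mp hc0S).2; simpa using this
      have hc0f : c0 ∈ munze.filter (fun x => decide (x ≤ b)) := by
        rw [List.mem_filter]
        exact ⟨(hmemS c0).mp (List.mem_filter.mp hc0S).1, by simpa using hc0b⟩
      obtain ⟨m, hm⟩ : ∃ m, PySem.List.max? (munze.filter (fun x => decide (x ≤ b))) (fun y => y) = some m := by
        rcases hflt : munze.filter (fun x => decide (x ≤ b)) with _ | ⟨c, t⟩
        · rw [hflt] at hc0f; cases hc0f
        · exact ⟨t.foldl max c, PySem.List.max?_id_cons c t⟩
      have hmem := PySem.List.max?_mem hm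
      have hmax := PySem.List.max?_isMax hm
      have hmmz : m ∈ munze := (List.mem_filter.mp hmem).1
      have hmb : m ≤ b := by
        have := (List.mem_filter.mp hmem).2; simpa using this
      have hm0 : (0 : Int) < m := lt_of_lt_of_le hc00 (hmax c0 hc0f)
      have hnd : S.Nodup := hperm.nodup_iff.mpr (PySem.Set.nodup_ofList munze)
      have hpge : S.Pairwise (fun a b => b ≤ a) := by
        have := PySem.List.sorted_pairwise_rev (PySem.Set.ofList munze) (fun x : Int => x)
        simpa using this
      have hpair : S.Pairwise (fun a b => b < a) :=
        (hpge.and hnd).imp (fun h => lt_of_le_of_ne h.1 (Ne.symm h.2))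
      have hmaxS : ∀ x ∈ S, x ≤ b → x ≤ m := fun x hx hxb => hmax x (by
        rw [List.mem_filter]
        exact ⟨(hmemS x).mp hx, by simpa using hxb⟩)
      -- B peels exactly one m off the front
      have hB : wechselnLoopB S b = m :: wechselnLoopB S (b - m) :=
        loopB_step S b m hpair ((hmemS m).mpr hmmz) hmb (by omega) hpos' hmaxS
      have hcas' : cascadeRem Spos (b - m) = 0 := by
        rw [← cascadeRem_step Spos b m (hpair.filter _)
          (List.mem_filter.mpr ⟨(hmemS m).mpr hmmz, by simpa using hm0⟩) hmb hm0
          (fun x hx hxb => hmaxS x (List.mem_filter.mp hx).1 hxb)]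
        exact hcas
      have hfuel : (b - m).toNat ≤ fuel := by omega
      simp only [wechselnLoopA, hpos', if_true, hm]
      rw [ih (b - m) hfuel hcas']
      exact hB.symm
    · rw [loopB_nonpos _ _ (by omega)]
      simp [wechselnLoopA, hpos']

-- ===== VERDICT (by name: the statement is the Claim_ definition above) =====
theorem wechseln_spec : Claim_equal_wechseln := by
  intro munze betrag _ hpre
  unfold Spec_wechseln wechseln wechseln_alt
  rcases hpre with hle | hcas
  · rw [loopB_nonpos _ _ hle]
    have : betrag.toNat = 0 := by omega
    rw [this]; rfl
  · exact loopA_eq_loopB munze betrag.toNat betrag (le_refl _) hcas
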